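-- pv_equiv track=rewrite | github.com/mashashaitz/HSE_homeworks | matplotlib_hw/Dothraki.py | prepare_words
-- ===== SOURCE A (Python) =====
-- def prepare_words(words):
--     letters = {}
--     for word in words:
--         if word[0].lower() in letters:
--             letters[word[0].lower()] += 1
--         else:
--             letters[word[0].lower()] = 1
--     letters_array = []
--     letters_quantity_array = []
--     for letter in sorted(letters):
--         letters_array.append(letter)
--         letters_quantity_array.append(letters[letter])
--     return letters_array, letters_quantity_array
-- ===== SOURCE B (Python) =====
-- def prepare_words(words):
--     # sort all lowercased first letters, then group equal runs in one pass
--     firsts = sorted(word[0].lower() for word in words)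
--     letters_array = []
--     letters_quantity_array = []
--     for letter in firsts:
--         if letters_array and letters_array[-1] == letter:
--             letters_quantity_array[-1] += 1
--         else:
--             letters_array.append(letter)
--             letters_quantity_array.append(1)
--     return letters_array, letters_quantity_array
-- ===== Notes on version B (the rewrite author's own statement) =====
-- stated objective: alternative
-- what changed: Replaces A's hash-count-then-sort-keys with sort-all-first-letters-then-group-runs in a single linear pass, maintaining the two output arrays directly instead of a dict.
import Mathlib
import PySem

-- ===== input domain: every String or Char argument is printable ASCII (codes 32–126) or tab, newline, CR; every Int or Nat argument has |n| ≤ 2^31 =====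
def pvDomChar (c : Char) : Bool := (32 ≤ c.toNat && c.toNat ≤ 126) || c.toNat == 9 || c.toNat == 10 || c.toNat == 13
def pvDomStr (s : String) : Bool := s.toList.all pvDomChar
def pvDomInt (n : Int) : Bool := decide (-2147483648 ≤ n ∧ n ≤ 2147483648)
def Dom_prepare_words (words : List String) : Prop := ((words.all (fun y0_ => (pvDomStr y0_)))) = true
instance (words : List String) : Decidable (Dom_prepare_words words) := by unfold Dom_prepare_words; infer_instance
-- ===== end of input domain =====

-- B groups runs of the sorted lowercased first letters in one pass, instead of A's dict counting followed by a key sort (alternative decomposition, same values).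

-- shared key: word[0].lower()  (Python raises IndexError on word = ""; such inputs are excluded by Pre_)
def pvFirstLower (w : String) : String :=
  match PySem.Str.pyGet? w 0 with
  | some c => String.ofList (PySem.Chars.lower [c])
  | none => ""

-- ===== PORT A =====
def prepare_words (words : List String) : List String × List Int :=
  let letters := words.foldl
    (fun (d : PySem.Dict String Int) w =>
      if d.contains (pvFirstLower w) then
        d.insert (pvFirstLower w) (d.getD (pvFirstLower w) 0 + 1)
      else
        d.insert (pvFirstLower w) 1)
    PySem.Dict.empty
  -- letters[letter]: the key is always present here, so getD with default 0 is the Python lookup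
  (PySem.List.sorted letters.keys id).foldl
    (fun acc letter => (acc.1 ++ [letter], acc.2 ++ [letters.getD letter 0]))
    ([], [])

-- ===== PORT B =====
def prepare_words_alt (words : List String) : List String × List Int :=
  let firsts := PySem.List.sorted (words.map pvFirstLower) id
  firsts.foldl
    (fun (acc : List String × List Int) letter =>
      -- 'letters_array and letters_array[-1] == letter'
      if acc.1.getLast? = some letter then
        (acc.1, acc.2.dropLast ++ [acc.2.getLastD 0 + 1])
      else
        (acc.1 ++ [letter], acc.2 ++ [(1 : Int)]))
    ([], [])

-- ===== PRECONDITION & SPEC =====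
-- Pre_ excludes lists containing an empty word: there word[0] raises IndexError in A (and in B).
def Pre_prepare_words (words : List String) : Prop := ∀ w ∈ words, w ≠ ""
instance (words : List String) : Decidable (Pre_prepare_words words) := by unfold Pre_prepare_words; infer_instance
def pvWitness_prepare_words : List String := ["Ba", "ab", "!x"]

def Spec_prepare_words (words : List String) (out : List String × List Int) : Prop := out = prepare_words_alt words
instance (words : List String) (out : List String × List Int) : Decidable (Spec_prepare_words words out) := by unfold Spec_prepare_words; infer_instance

-- ===== CLAIM (what is proved, stated in full; the proofs are below) =====
def Claim_equal_prepare_words : Prop := ∀ (words : List String), Dom_prepare_words words → Pre_prepare_words words → Spec_prepare_words words (prepare_words words)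

-- ===== LEMMAS AND PROOFS =====

-- A's output in closed form over l = words.map pvFirstLower: the ≤-sorted distinct letters with their counts in l
lemma pvA_char (words : List String) :
    prepare_words words =
      (PySem.List.sorted (PySem.Set.ofList (words.map pvFirstLower)) id,
       (PySem.List.sorted (PySem.Set.ofList (words.map pvFirstLower)) id).map
         (fun x => ((words.map pvFirstLower).count x : Int))) := by
  unfold prepare_words
  have hfun : (fun (d : PySem.Dict String Int) w =>
      if d.contains (pvFirstLower w) then
        d.insert (pvFirstLower w) (d.getD (pvFirstLower w) 0 + 1)
      else
        d.insert (pvFirstLower w) 1)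
      = fun (d : PySem.Dict String Int) w => d.insert (pvFirstLower w) (d.getD (pvFirstLower w) 0 + 1) := by
    funext d w
    by_cases h : d.contains (pvFirstLower w) = true
    · simp [h]
    · simp [h, PySem.Dict.getD_of_not_contains d 0 (by simpa using h)]
  have hmap := @List.foldl_map String String (PySem.Dict String Int) pvFirstLower
      (fun d x => d.insert x (d.getD x 0 + 1)) words PySem.Dict.empty
  have hd : words.foldl
      (fun (d : PySem.Dict String Int) w =>
        if d.contains (pvFirstLower w) then
          d.insert (pvFirstLower w) (d.getD (pvFirstLower w) 0 + 1)
        else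
          d.insert (pvFirstLower w) 1)
      PySem.Dict.empty
      = PySem.Dict.counter (words.map pvFirstLower) := by
    rw [hfun, ← hmap, PySem.Dict.foldl_insert_getD_add_one_eq_counter]
  simp only [hd, PySem.Dict.keys_counter]
  rw [PySem.List.foldl_prod_mk (fun (ls : List String) (x : String) => ls ++ [x])
      (fun (cs : List Int) (x : String) => cs ++ [(PySem.Dict.counter (words.map pvFirstLower)).getD x 0])]
  rw [PySem.List.foldl_append_singleton_eq_map (fun x : String => x),
      PySem.List.foldl_append_singleton_eq_map (fun x : String => (PySem.Dict.counter (words.map pvFirstLower)).getD x 0)]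
  have : (fun x => (PySem.Dict.counter (words.map pvFirstLower)).getD x 0)
      = fun x : String => ((words.map pvFirstLower).count x : Int) := by
    funext x; exact PySem.Dict.getD_counter _ x
  rw [this]
  simp

lemma pvOfList_append_singleton {α : Type} [BEq α] (s : List α) (a : α) :
    PySem.Set.ofList (s ++ [a]) = (PySem.Set.ofList s).add a := by
  simp [PySem.Set.ofList, List.foldl_append]

-- the distinct elements of a ≤-sorted list, in first-occurrence order, are <-sorted
lemma pvPairwise_lt_ofList (s : List String) (h : s.Pairwise (· ≤ ·)) :
    (PySem.Set.ofList s).Pairwise (· < ·) := by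
  induction s using List.reverseRecOn with
  | nil => simp [PySem.Set.ofList, PySem.Set.empty]
  | append_singleton s a ih =>
    have hparts := List.pairwise_append.mp h
    have hb : ∀ x ∈ s, x ≤ a := fun x hx => hparts.2.2 x hx a (by simp)
    rw [pvOfList_append_singleton, PySem.Set.add]
    split_ifs with hc
    · exact ih hparts.1
    · simp at hc
      have hmem : a ∉ PySem.Set.ofList s := by simpa using hc
      rw [List.pairwise_append]
      refine ⟨ih hparts.1, by simp, ?_⟩
      intro x hx y hy
      rw [List.mem_singleton] at hy; subst hy
      have hxs : x ∈ s := (PySem.Set.mem_ofList s x).mp hx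
      exact lt_of_le_of_ne (hb x hxs) (fun e => hmem (e ▸ hx))

-- the last element of a ≤-sorted list containing its maximum a is a
lemma pvGetLast?_max (L : List String) (hL : L.Pairwise (· ≤ ·)) (a : String)
    (ha : a ∈ L) (hmax : ∀ x ∈ L, x ≤ a) : L.getLast? = some a := by
  induction L with
  | nil => cases ha
  | cons x t ih =>
    cases t with
    | nil =>
      rw [List.mem_singleton] at ha
      simp [ha]
    | cons y u =>
      rw [List.getLast?_cons_cons]
      have htail := (List.pairwise_cons.mp hL).2
      have hhead := (List.pairwise_cons.mp hL).1
      apply ih htail ?_ (fun z hz => hmax z (List.mem_cons_of_mem x hz))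
      rcases List.mem_cons.mp ha with rfl | h
      · have h1 : a ≤ y := hhead y (List.mem_cons_self)
        have h2 : y ≤ a := hmax y (List.mem_cons_of_mem a List.mem_cons_self)
        exact (le_antisymm h2 h1) ▸ List.mem_cons_self
      · exact h

-- bumping the entry of the last letter, as B does, is a pointwise count update
lemma pvMap_update_last (L : List String) (f : String → Int) (a : String)
    (hnd : L.Nodup) (hlast : L.getLast? = some a) :
    ((L.map f).dropLast ++ [(L.map f).getLastD 0 + 1])
      = L.map (fun x => if x = a then f x + 1 else f x) := by
  obtain ⟨L', rfl⟩ := List.getLast?_eq_some_iff.mp hlast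
  have haL' : a ∉ L' := by
    rw [List.nodup_append] at hnd
    intro hmem
    exact hnd.2.2 a hmem a List.mem_cons_self rfl
  simp only [List.map_append, List.map_cons, List.map_nil, List.dropLast_concat,
    List.getLastD_concat]
  congr 1
  · apply List.map_congr_left
    intro x hx
    rw [if_neg (fun e : x = a => haL' (e ▸ hx))]

-- B's grouping fold over a ≤-sorted list yields the distinct letters with their counts
lemma pvB_fold (s : List String) (hs : s.Pairwise (· ≤ ·)) :
    s.foldl
      (fun (acc : List String × List Int) letter =>
        if acc.1.getLast? = some letter then
          (acc.1, acc.2.dropLast ++ [acc.2.getLastD 0 + 1])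
        else
          (acc.1 ++ [letter], acc.2 ++ [(1 : Int)]))
      ([], [])
    = (PySem.Set.ofList s, (PySem.Set.ofList s).map (fun x => (s.count x : Int))) := by
  induction s using List.reverseRecOn with
  | nil => simp [PySem.Set.ofList, PySem.Set.empty]
  | append_singleton s a ih =>
    have hparts := List.pairwise_append.mp hs
    have hb : ∀ x ∈ PySem.Set.ofList s, x ≤ a := fun x hx =>
      hparts.2.2 x ((PySem.Set.mem_ofList s x).mp hx) a (by simp)
    have hle : (PySem.Set.ofList s).Pairwise (· ≤ ·) :=
      (pvPairwise_lt_ofList s hparts.1).imp le_of_lt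
    rw [List.foldl_append, ih hparts.1]
    simp only [List.foldl_cons, List.foldl_nil]
    by_cases hmem : a ∈ s
    · have hlast : (PySem.Set.ofList s).getLast? = some a :=
        pvGetLast?_max _ hle a ((PySem.Set.mem_ofList s a).mpr hmem) hb
      rw [if_pos hlast]
      have h1 : PySem.Set.ofList (s ++ [a]) = PySem.Set.ofList s := by
        rw [pvOfList_append_singleton, PySem.Set.add]
        split_ifs with hc
        · rfl
        · exfalso; simp [PySem.Set.mem_ofList] at hc; exact hc hmem
      rw [h1]
      refine Prod.ext rfl ?_
      simp only
      rw [pvMap_update_last _ _ a (PySem.Set.nodup_ofList s) hlast]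
      apply List.map_congr_left
      intro x hx
      by_cases hxa : x = a
      · subst hxa
        rw [if_pos rfl]
        simp [List.count_append]
      · rw [if_neg hxa]
        have hz : List.count x [a] = 0 := by simp [Ne.symm hxa]
        rw [List.count_append, hz, Nat.add_zero]
    · have hlast : ¬ (PySem.Set.ofList s).getLast? = some a := by
        intro hEq
        exact hmem ((PySem.Set.mem_ofList s a).mp (List.mem_of_getLast? hEq))
      rw [if_neg hlast]
      have h1 : PySem.Set.ofList (s ++ [a]) = PySem.Set.ofList s ++ [a] := by
        rw [pvOfList_append_singleton, PySem.Set.add]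
        split_ifs with hc
        · exfalso; simp [PySem.Set.mem_ofList] at hc; exact hmem hc
        · rfl
      rw [h1]
      refine Prod.ext rfl ?_
      simp only [List.map_append, List.map_cons, List.map_nil]
      congr 1
      · apply List.map_congr_left
        intro x hx
        have hxa : x ≠ a := fun e => hmem (e ▸ (PySem.Set.mem_ofList s x).mp hx)
        have hz : List.count x [a] = 0 := by simp [Ne.symm hxa]
        rw [List.count_append, hz, Nat.add_zero]
      · rw [List.count_append]
        simp [List.count_eq_zero_of_not_mem hmem]

-- the two letter lists coincide: sorting the distinct elements = distinct elements of the sorted list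
lemma pvSorted_ofList_eq (l : List String) :
    PySem.List.sorted (PySem.Set.ofList l) id = PySem.Set.ofList (PySem.List.sorted l id) := by
  apply PySem.List.sorted_eq_of_perm_of_pairwise_lt
  · rw [List.perm_ext_iff_of_nodup (PySem.Set.nodup_ofList _) (PySem.Set.nodup_ofList _)]
    intro x
    rw [PySem.Set.mem_ofList, PySem.Set.mem_ofList]
    exact (PySem.List.sorted_perm l id false).mem_iff
  · exact pvPairwise_lt_ofList _ (by simpa using PySem.List.sorted_pairwise l id)

-- ===== VERDICT (by name: the statement is the Claim_ definition above) =====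
theorem prepare_words_spec : Claim_equal_prepare_words := by
  intro words _ _
  unfold Spec_prepare_words prepare_words_alt
  rw [pvA_char]
  rw [pvB_fold _ (by simpa using PySem.List.sorted_pairwise (words.map pvFirstLower) id)]
  rw [pvSorted_ofList_eq]
  have hc : (fun x : String => ((PySem.List.sorted (words.map pvFirstLower) id).count x : Int))
      = fun x : String => (((words.map pvFirstLower)).count x : Int) := by
    funext x
    exact congrArg (fun n : Nat => (n : Int))
      ((PySem.List.sorted_perm (words.map pvFirstLower) id false).count_eq x)
  rw [hc]
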